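-- pv_equiv track=rewrite | github.com/luciobattisti/dsa | recursion/find_first_and_last_position_in_sorted_array.py | find_left_index
-- ===== SOURCE A (Python) =====
-- def find_left_index(a, m, t):
--     if m == 0:
--         return m
--
--     while m > 0:
--         if a[m - 1] == t:
--             m -= 1
--         else:
--             break
--
--     return m
-- ===== SOURCE B (Python) =====
-- def find_left_index(a, m, t):
--     if m <= 0:
--         return m
--     ans = 0
--     for j, x in enumerate(a[:m]):
--         if x != t:
--             ans = j + 1
--     return ans
-- ===== Notes on version B (the rewrite author's own statement) =====
-- stated objective: alternative
-- what changed: A scans leftwards from index m decrementing while a[m-1]==t; B makes one forward pass over the prefix a[:m] keeping the index after the last mismatch (no backward while loop, no index mutation).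
import Mathlib
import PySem

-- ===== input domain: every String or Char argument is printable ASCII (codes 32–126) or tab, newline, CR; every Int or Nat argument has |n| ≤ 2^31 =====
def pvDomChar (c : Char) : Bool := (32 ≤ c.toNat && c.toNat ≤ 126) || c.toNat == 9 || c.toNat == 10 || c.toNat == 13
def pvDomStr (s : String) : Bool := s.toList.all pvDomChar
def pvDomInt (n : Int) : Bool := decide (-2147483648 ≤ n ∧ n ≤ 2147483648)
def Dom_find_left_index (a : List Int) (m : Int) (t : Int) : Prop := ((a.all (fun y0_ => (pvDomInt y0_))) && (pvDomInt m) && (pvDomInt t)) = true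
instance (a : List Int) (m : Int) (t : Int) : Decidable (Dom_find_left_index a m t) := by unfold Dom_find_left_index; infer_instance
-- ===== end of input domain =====

-- B replaces A's backward while loop with a single forward pass over a[:m] that keeps
-- the index after the last element ≠ t (objective: alternative decomposition, same cost).

-- ===== PORT A =====
-- while m > 0: if a[m-1] == t: m -= 1 else: break   — fuel = m.toNat bounds the ≤ m iterations
def pvAGo (a : List Int) (t : Int) : Nat → Int → Int
  | 0, m => m
  | fuel+1, m =>
    if m > 0 then
      match PySem.List.pyGet? a (m - 1) with
      | some v => if v == t then pvAGo a t fuel (m - 1) else m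
      | none => 0   -- IndexError in Python; excluded by Pre_find_left_index
    else m

def find_left_index (a : List Int) (m : Int) (t : Int) : Int :=
  if m == 0 then m else pvAGo a t m.toNat m

-- ===== PORT B =====
def find_left_index_alt (a : List Int) (m : Int) (t : Int) : Int :=
  if m ≤ 0 then m
  else (PySem.List.enumerate (PySem.List.slice a none (some m)) 0).foldl
        (fun ans jx => if jx.2 ≠ t then jx.1 + 1 else ans) 0

-- ===== PRECONDITION & SPEC =====
-- Pre_ excludes m > len(a): there A's first access a[m-1] raises IndexError.
def Pre_find_left_index (a : List Int) (m : Int) (t : Int) : Prop := m ≤ (a.length : Int)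
instance (a : List Int) (m : Int) (t : Int) : Decidable (Pre_find_left_index a m t) := by
  unfold Pre_find_left_index; infer_instance

def pvWitness_find_left_index : List Int × Int × Int := ([1, 2, 2, 2, 3], 4, 2)

def Spec_find_left_index (a : List Int) (m : Int) (t : Int) (out : Int) : Prop := out = find_left_index_alt a m t
instance (a : List Int) (m : Int) (t : Int) (out : Int) : Decidable (Spec_find_left_index a m t out) := by unfold Spec_find_left_index; infer_instance

-- ===== CLAIM (what is proved, stated in full; the proofs are below) =====
def Claim_equal_find_left_index : Prop := ∀ (a : List Int) (m : Int) (t : Int), Dom_find_left_index a m t → Pre_find_left_index a m t → Spec_find_left_index a m t (find_left_index a m t)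

-- ===== LEMMAS AND PROOFS =====

lemma pvAGo_zero (a : List Int) (t : Int) (fuel : Nat) : pvAGo a t fuel 0 = 0 := by
  cases fuel <;> simp [pvAGo]

lemma pvAGo_eq_foldl (a : List Int) (t : Int) (n : Nat) (h : n ≤ a.length) :
    ∀ fuel, n ≤ fuel →
      pvAGo a t fuel (n : Int) =
        (PySem.List.enumerate (a.take n) 0).foldl
          (fun ans jx => if jx.2 ≠ t then jx.1 + 1 else ans) 0 := by
  induction n with
  | zero =>
    intro fuel _
    simp [pvAGo_zero, PySem.List.enumerate_nil]
  | succ n ih =>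
    intro fuel hf
    obtain ⟨f, rfl⟩ : ∃ f, fuel = f + 1 := ⟨fuel - 1, by omega⟩
    have hn : n < a.length := by omega
    have hget : PySem.List.pyGet? a ((↑(n + 1) : Int) - 1) = some a[n] := by
      have : ((↑(n + 1) : Int) - 1) = (n : Int) := by push_cast; ring
      rw [this, PySem.List.pyGet?_natCast]
      simp [hn]
    have htake : a.take (n + 1) = a.take n ++ [a[n]] := by
      rw [List.take_add_one]
      simp [hn]
    have henum : PySem.List.enumerate (a.take (n + 1)) 0
        = PySem.List.enumerate (a.take n) 0 ++ [((n : Int), a[n])] := by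
      rw [htake, PySem.List.enumerate_append]
      simp [PySem.List.enumerate_cons, PySem.List.enumerate_nil, min_eq_left (le_of_lt hn)]
    rw [henum, List.foldl_append]
    by_cases hv : a[n] = t
    · have : pvAGo a t (f + 1) (↑(n + 1) : Int) = pvAGo a t f (n : Int) := by
        simp only [pvAGo, hget]
        have h1 : ((↑(n + 1) : Int) - 1) = (n : Int) := by push_cast; ring
        simp [hv]
      rw [this, ih (by omega) f (by omega)]
      simp [hv]
    · have : pvAGo a t (f + 1) (↑(n + 1) : Int) = (↑(n + 1) : Int) := by
        simp only [pvAGo, hget]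
        simp [hv]
      rw [this]
      simp [hv]

-- ===== VERDICT (by name: the statement is the Claim_ definition above) =====
theorem find_left_index_spec : Claim_equal_find_left_index := by
  intro a m t _ hpre
  unfold Spec_find_left_index find_left_index find_left_index_alt
  by_cases hm : m ≤ 0
  · by_cases h0 : m = 0
    · simp [h0]
    · have hb : (m == 0) = false := by simp [h0]
      have hmt : m.toNat = 0 := by omega
      rw [hb, hmt]
      simp [pvAGo, hm]
  · have hb : (m == 0) = false := by simp; omega
    rw [hb]
    simp only [Bool.false_eq_true, if_false, if_neg hm]
    have hle : m.toNat ≤ a.length := by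
      unfold Pre_find_left_index at hpre; omega
    rw [PySem.List.slice_to a (by omega : (0:Int) ≤ m)]
    have hmn : m = ((m.toNat : Nat) : Int) := by omega
    rw [hmn, Int.toNat_natCast]
    exact pvAGo_eq_foldl a t m.toNat hle m.toNat le_rfl
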